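-- pv_equiv track=rewrite | github.com/raeez/chiral-bar-cobar | compute/lib/minimal_model_stabilization.py | kac_table
-- ===== SOURCE A (Python) =====
-- from typing import Dict, List, Tuple, Optional
--
-- def kac_table(p: int, q: int) -> List[Tuple[int, int]]:
--     """Independent module labels for M(p,q), 2 <= p < q.
--
--     Returns list of (r, s) with 1 <= r <= p-1, 1 <= s <= q-1,
--     deduplicated under (r,s) ~ (p-r, q-s).
--     Total: (p-1)(q-1)/2 modules.
--     """
--     seen = set()
--     modules = []
--     for r in range(1, p):
--         for s in range(1, q):
--             if (p - r, q - s) not in seen: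
--                 seen.add((r, s))
--                 modules.append((r, s))
--     return modules
-- ===== SOURCE B (Python) =====
-- from typing import Dict, List, Tuple, Optional
--
-- def kac_table(p: int, q: int) -> List[Tuple[int, int]]:
--     """Independent module labels for M(p,q), no seen-set: (r,s) is kept
--     iff its row lies in the lower half (2r < p), or on the middle row
--     (2r == p) with s in the lower half inclusive (s <= q//2)."""
--     modules = []
--     for r in range(1, p):
--         if 2 * r < p:
--             for s in range(1, q):
--                 modules.append((r, s))
--         elif 2 * r == p:
--             for s in range(1, q // 2 + 1):
--                 modules.append((r, s))
--     return modules
-- ===== Notes on version B (the rewrite author's own statement) =====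
-- stated objective: faster
-- what changed: Replaced the seen-set with a closed-form membership criterion: (r,s) is kept iff 2r < p, or 2r == p and s <= q//2, so the set and its per-pair lookups disappear.
import Mathlib
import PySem

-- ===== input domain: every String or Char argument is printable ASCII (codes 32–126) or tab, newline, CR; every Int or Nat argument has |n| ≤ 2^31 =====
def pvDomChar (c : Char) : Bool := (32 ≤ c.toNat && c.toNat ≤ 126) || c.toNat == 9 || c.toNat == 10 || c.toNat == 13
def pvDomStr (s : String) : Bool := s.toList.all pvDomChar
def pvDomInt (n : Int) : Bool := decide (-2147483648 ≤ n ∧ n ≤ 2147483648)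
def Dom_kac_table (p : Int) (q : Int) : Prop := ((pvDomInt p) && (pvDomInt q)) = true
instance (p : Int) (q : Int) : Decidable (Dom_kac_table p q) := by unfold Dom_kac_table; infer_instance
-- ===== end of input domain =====

-- B drops A's seen-set: (r,s) is kept iff 2r < p, or 2r = p and s ≤ q//2 (no auxiliary structure, no lookups).

-- ===== PORT A =====
def kac_table (p : Int) (q : Int) : List (Int × Int) :=
  ((PySem.List.pyRange 1 p 1).foldl
      (fun (st : PySem.Set (Int × Int) × List (Int × Int)) r =>
        (PySem.List.pyRange 1 q 1).foldl
          (fun (st : PySem.Set (Int × Int) × List (Int × Int)) s =>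
            if PySem.Set.contains st.1 (p - r, q - s) then st
            else (PySem.Set.add st.1 (r, s), st.2 ++ [(r, s)]))
          st)
      (PySem.Set.empty, [])).2

-- ===== PORT B =====
def kac_table_alt (p : Int) (q : Int) : List (Int × Int) :=
  (PySem.List.pyRange 1 p 1).foldl
    (fun (mods : List (Int × Int)) r =>
      if 2 * r < p then
        (PySem.List.pyRange 1 q 1).foldl (fun mods s => mods ++ [(r, s)]) mods
      else if 2 * r = p then
        (PySem.List.pyRange 1 (PySem.Int.floordiv q 2 + 1) 1).foldl (fun mods s => mods ++ [(r, s)]) mods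
      else mods)
    []

-- ===== PRECONDITION & SPEC =====
def Spec_kac_table (p : Int) (q : Int) (out : List (Int × Int)) : Prop := out = kac_table_alt p q
instance (p : Int) (q : Int) (out : List (Int × Int)) : Decidable (Spec_kac_table p q out) := by unfold Spec_kac_table; infer_instance

-- ===== CLAIM (what is proved, stated in full; the proofs are below) =====
def Claim_equal_kac_table : Prop := ∀ (p : Int) (q : Int), Dom_kac_table p q → Spec_kac_table p q (kac_table p q)

-- ===== LEMMAS AND PROOFS =====

-- (r,s) is appended by A iff keepB: lower-half row, or middle row with s in the lower half inclusive.
def keepB (p q r s : Int) : Bool := decide (2*r < p) || (decide (2*r = p) && decide (2*s ≤ q))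

lemma kac_inner (p q r : Int) (_hr1 : 1 ≤ r) (hrp : r < p) :
    ∀ (n : Nat) (s0 : Int) (seen : PySem.Set (Int × Int)) (mods : List (Int × Int)),
      1 ≤ s0 → (s0 ≤ q ∨ s0 = 1) → (q - s0).toNat = n →
      (∀ x : Int × Int, x ∈ seen ↔
          ((1 ≤ x.1 ∧ x.1 < r ∧ 1 ≤ x.2 ∧ x.2 < q ∧ keepB p q x.1 x.2 = true) ∨
           (x.1 = r ∧ 1 ≤ x.2 ∧ x.2 < s0 ∧ keepB p q r x.2 = true))) →
      ((PySem.List.pyRange s0 q 1).foldl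
          (fun (st : PySem.Set (Int × Int) × List (Int × Int)) s =>
            if PySem.Set.contains st.1 (p - r, q - s) then st
            else (PySem.Set.add st.1 (r, s), st.2 ++ [(r, s)]))
          (seen, mods)).2
        = mods ++ ((PySem.List.pyRange s0 q 1).filter (fun s => keepB p q r s)).map (fun s => (r, s)) ∧
      (∀ x : Int × Int, x ∈ ((PySem.List.pyRange s0 q 1).foldl
          (fun (st : PySem.Set (Int × Int) × List (Int × Int)) s =>
            if PySem.Set.contains st.1 (p - r, q - s) then st
            else (PySem.Set.add st.1 (r, s), st.2 ++ [(r, s)]))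
          (seen, mods)).1 ↔
          ((1 ≤ x.1 ∧ x.1 < r ∧ 1 ≤ x.2 ∧ x.2 < q ∧ keepB p q x.1 x.2 = true) ∨
           (x.1 = r ∧ 1 ≤ x.2 ∧ x.2 < q ∧ keepB p q r x.2 = true))) := by
  intro n
  induction n with
  | zero =>
    intro s0 seen mods hs1 hsq hn hseen
    have hqs : q ≤ s0 := by omega
    rw [PySem.List.pyRange_one_eq_nil hqs]
    simp only [List.foldl_nil, List.filter_nil, List.map_nil, List.append_nil]
    refine ⟨trivial, fun x => ?_⟩
    rw [hseen x]
    constructor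
    · rintro (h | ⟨h1, h2, h3, h4⟩)
      · exact Or.inl h
      · exact Or.inr ⟨h1, h2, by omega, h4⟩
    · rintro (h | ⟨h1, h2, h3, h4⟩)
      · exact Or.inl h
      · exact Or.inr ⟨h1, h2, by omega, h4⟩
  | succ n ih =>
    intro s0 seen mods hs1 hsq hn hseen
    have hlt : s0 < q := by omega
    rw [PySem.List.pyRange_one_cons hlt]
    simp only [List.foldl_cons, List.filter_cons]
    rcases lt_trichotomy (2*r) p with hc | hc | hc
    · -- lower-half row: mirror never seen, (r,s0) kept
      have hkt : keepB p q r s0 = true := by simp [keepB]; omega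
      have hnm : (p - r, q - s0) ∉ seen := by
        intro hmem
        rw [hseen] at hmem
        rcases hmem with ⟨h1, h2, h3, h4, h5⟩ | ⟨h1, h2, h3, h4⟩ <;> dsimp only at * <;> omega
      have hcf : PySem.Set.contains seen (p - r, q - s0) = false := by
        rw [Bool.eq_false_iff]
        intro htrue
        exact hnm ((PySem.Set.contains_iff _ _).mp htrue)
      have hstep : (if PySem.Set.contains seen (p - r, q - s0) then ((seen, mods) : PySem.Set (Int × Int) × List (Int × Int))
            else (PySem.Set.add seen (r, s0), mods ++ [(r, s0)]))
          = (PySem.Set.add seen (r, s0), mods ++ [(r, s0)]) := by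
        rw [hcf]; simp
      rw [hstep]
      have hseen' : ∀ x : Int × Int, x ∈ PySem.Set.add seen (r, s0) ↔
          ((1 ≤ x.1 ∧ x.1 < r ∧ 1 ≤ x.2 ∧ x.2 < q ∧ keepB p q x.1 x.2 = true) ∨
           (x.1 = r ∧ 1 ≤ x.2 ∧ x.2 < s0 + 1 ∧ keepB p q r x.2 = true)) := by
        intro x
        rw [PySem.Set.mem_add, hseen]
        constructor
        · rintro ((h | ⟨h1, h2, h3, h4⟩) | hx)
          · exact Or.inl h
          · exact Or.inr ⟨h1, h2, by omega, h4⟩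
          · subst hx; exact Or.inr ⟨rfl, by omega, by omega, hkt⟩
        · rintro (h | ⟨h1, h2, h3, h4⟩)
          · exact Or.inl (Or.inl h)
          · rcases lt_or_eq_of_le (show x.2 ≤ s0 by omega) with h' | h'
            · exact Or.inl (Or.inr ⟨h1, h2, h', h4⟩)
            · right
              cases x
              simp only at h1 h'
              rw [h1, h']
      obtain ⟨ih2, ih1⟩ := ih (s0+1) (PySem.Set.add seen (r, s0)) (mods ++ [(r, s0)])
        (by omega) (Or.inl (by omega)) (by omega) hseen'
      refine ⟨?_, ih1⟩
      rw [ih2, hkt]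
      simp [List.append_assoc]
    · -- middle row
      by_cases h2s : 2*s0 ≤ q
      · -- kept
        have hkt : keepB p q r s0 = true := by simp [keepB]; omega
        have hnm : (p - r, q - s0) ∉ seen := by
          intro hmem
          rw [hseen] at hmem
          rcases hmem with ⟨h1, h2, h3, h4, h5⟩ | ⟨h1, h2, h3, h4⟩ <;> dsimp only at * <;> omega
        have hcf : PySem.Set.contains seen (p - r, q - s0) = false := by
          rw [Bool.eq_false_iff]
          intro htrue
          exact hnm ((PySem.Set.contains_iff _ _).mp htrue)
        have hstep : (if PySem.Set.contains seen (p - r, q - s0) then ((seen, mods) : PySem.Set (Int × Int) × List (Int × Int))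
              else (PySem.Set.add seen (r, s0), mods ++ [(r, s0)]))
            = (PySem.Set.add seen (r, s0), mods ++ [(r, s0)]) := by
          rw [hcf]; simp
        rw [hstep]
        have hseen' : ∀ x : Int × Int, x ∈ PySem.Set.add seen (r, s0) ↔
            ((1 ≤ x.1 ∧ x.1 < r ∧ 1 ≤ x.2 ∧ x.2 < q ∧ keepB p q x.1 x.2 = true) ∨
             (x.1 = r ∧ 1 ≤ x.2 ∧ x.2 < s0 + 1 ∧ keepB p q r x.2 = true)) := by
          intro x
          rw [PySem.Set.mem_add, hseen]
          constructor
          · rintro ((h | ⟨h1, h2, h3, h4⟩) | hx)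
            · exact Or.inl h
            · exact Or.inr ⟨h1, h2, by omega, h4⟩
            · subst hx; exact Or.inr ⟨rfl, by omega, by omega, hkt⟩
          · rintro (h | ⟨h1, h2, h3, h4⟩)
            · exact Or.inl (Or.inl h)
            · rcases lt_or_eq_of_le (show x.2 ≤ s0 by omega) with h' | h'
              · exact Or.inl (Or.inr ⟨h1, h2, h', h4⟩)
              · right
                cases x
                simp only at h1 h'
                rw [h1, h']
        obtain ⟨ih2, ih1⟩ := ih (s0+1) (PySem.Set.add seen (r, s0)) (mods ++ [(r, s0)])
          (by omega) (Or.inl (by omega)) (by omega) hseen'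
        refine ⟨?_, ih1⟩
        rw [ih2, hkt]
        simp [List.append_assoc]
      · -- skipped: mirror (r, q - s0) already emitted in this row
        have hkf : keepB p q r s0 = false := by simp [keepB]; omega
        have hmem : (p - r, q - s0) ∈ seen :=
          (hseen _).mpr (Or.inr ⟨show p - r = r by omega, show (1:Int) ≤ q - s0 by omega,
            show q - s0 < s0 by omega, by simp [keepB]; omega⟩)
        have hct : PySem.Set.contains seen (p - r, q - s0) = true := (PySem.Set.contains_iff _ _).mpr hmem
        have hstep : (if PySem.Set.contains seen (p - r, q - s0) then ((seen, mods) : PySem.Set (Int × Int) × List (Int × Int))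
              else (PySem.Set.add seen (r, s0), mods ++ [(r, s0)]))
            = (seen, mods) := by
          rw [hct]; simp
        rw [hstep]
        have hseen' : ∀ x : Int × Int, x ∈ seen ↔
            ((1 ≤ x.1 ∧ x.1 < r ∧ 1 ≤ x.2 ∧ x.2 < q ∧ keepB p q x.1 x.2 = true) ∨
             (x.1 = r ∧ 1 ≤ x.2 ∧ x.2 < s0 + 1 ∧ keepB p q r x.2 = true)) := by
          intro x
          rw [hseen]
          constructor
          · rintro (h | ⟨h1, h2, h3, h4⟩)
            · exact Or.inl h
            · exact Or.inr ⟨h1, h2, by omega, h4⟩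
          · rintro (h | ⟨h1, h2, h3, h4⟩)
            · exact Or.inl h
            · refine Or.inr ⟨h1, h2, ?_, h4⟩
              rcases lt_or_eq_of_le (show x.2 ≤ s0 by omega) with h' | h'
              · exact h'
              · rw [h'] at h4; rw [h4] at hkf; exact absurd hkf (by simp)
        obtain ⟨ih2, ih1⟩ := ih (s0+1) seen mods (by omega) (Or.inl (by omega)) (by omega) hseen'
        refine ⟨?_, ih1⟩
        rw [ih2, hkf]
        simp
    · -- upper-half row: mirror row was fully emitted earlier
      have hkf : keepB p q r s0 = false := by simp [keepB]; omega
      have hmem : (p - r, q - s0) ∈ seen :=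
        (hseen _).mpr (Or.inl ⟨show (1:Int) ≤ p - r by omega, show p - r < r by omega,
          show (1:Int) ≤ q - s0 by omega, show q - s0 < q by omega, by simp [keepB]; omega⟩)
      have hct : PySem.Set.contains seen (p - r, q - s0) = true := (PySem.Set.contains_iff _ _).mpr hmem
      have hstep : (if PySem.Set.contains seen (p - r, q - s0) then ((seen, mods) : PySem.Set (Int × Int) × List (Int × Int))
            else (PySem.Set.add seen (r, s0), mods ++ [(r, s0)]))
          = (seen, mods) := by
        rw [hct]; simp
      rw [hstep]
      have hseen' : ∀ x : Int × Int, x ∈ seen ↔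
          ((1 ≤ x.1 ∧ x.1 < r ∧ 1 ≤ x.2 ∧ x.2 < q ∧ keepB p q x.1 x.2 = true) ∨
           (x.1 = r ∧ 1 ≤ x.2 ∧ x.2 < s0 + 1 ∧ keepB p q r x.2 = true)) := by
        intro x
        rw [hseen]
        constructor
        · rintro (h | ⟨h1, h2, h3, h4⟩)
          · exact Or.inl h
          · exact Or.inr ⟨h1, h2, by omega, h4⟩
        · rintro (h | ⟨h1, h2, h3, h4⟩)
          · exact Or.inl h
          · refine Or.inr ⟨h1, h2, ?_, h4⟩
            rcases lt_or_eq_of_le (show x.2 ≤ s0 by omega) with h' | h'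
            · exact h'
            · rw [h'] at h4; rw [h4] at hkf; exact absurd hkf (by simp)
      obtain ⟨ih2, ih1⟩ := ih (s0+1) seen mods (by omega) (Or.inl (by omega)) (by omega) hseen'
      refine ⟨?_, ih1⟩
      rw [ih2, hkf]
      simp

lemma kac_filter_mid (p q r : Int) (hb : 2*r = p) :
    (PySem.List.pyRange 1 q 1).filter (fun s => keepB p q r s)
      = PySem.List.pyRange 1 (PySem.Int.floordiv q 2 + 1) 1 := by
  by_cases hq : q ≤ 1
  · have hm : PySem.Int.floordiv q 2 < 1 :=
      (PySem.Int.floordiv_lt_iff_lt_mul (by omega : (0:Int) < 2)).mpr (by omega)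
    rw [PySem.List.pyRange_one_eq_nil (by omega : q ≤ 1),
        PySem.List.pyRange_one_eq_nil (by omega : PySem.Int.floordiv q 2 + 1 ≤ 1)]
    rfl
  · have h0 : (0:Int) ≤ PySem.Int.floordiv q 2 :=
      (PySem.Int.le_floordiv_iff_mul_le (by omega : (0:Int) < 2)).mpr (by omega)
    have hmq : PySem.Int.floordiv q 2 < q :=
      (PySem.Int.floordiv_lt_iff_lt_mul (by omega : (0:Int) < 2)).mpr (by omega)
    rw [PySem.List.pyRange_one_append 1 (PySem.Int.floordiv q 2 + 1) q (by omega) (by omega),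
        List.filter_append]
    have h1 : (PySem.List.pyRange 1 (PySem.Int.floordiv q 2 + 1) 1).filter (fun s => keepB p q r s)
        = PySem.List.pyRange 1 (PySem.Int.floordiv q 2 + 1) 1 := by
      rw [List.filter_eq_self]
      intro s hs
      rw [PySem.List.mem_pyRange_one] at hs
      have h2s : s * 2 ≤ q :=
        (PySem.Int.le_floordiv_iff_mul_le (by omega : (0:Int) < 2)).mp (by omega)
      simp [keepB]; omega
    have h2 : (PySem.List.pyRange (PySem.Int.floordiv q 2 + 1) q 1).filter (fun s => keepB p q r s)
        = [] := by
      rw [List.filter_eq_nil_iff]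
      intro s hs
      rw [PySem.List.mem_pyRange_one] at hs
      have h2s : ¬ (s * 2 ≤ q) := fun h =>
        absurd ((PySem.Int.le_floordiv_iff_mul_le (by omega : (0:Int) < 2)).mpr h) (by omega)
      simp [keepB]; omega
    rw [h1, h2, List.append_nil]

lemma kac_outer (p q : Int) :
    ∀ (n : Nat) (r0 : Int) (seen : PySem.Set (Int × Int)) (mods : List (Int × Int)),
      1 ≤ r0 → (p - r0).toNat = n →
      (∀ x : Int × Int, x ∈ seen ↔
          (1 ≤ x.1 ∧ x.1 < r0 ∧ 1 ≤ x.2 ∧ x.2 < q ∧ keepB p q x.1 x.2 = true)) →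
      ((PySem.List.pyRange r0 p 1).foldl
          (fun (st : PySem.Set (Int × Int) × List (Int × Int)) r =>
            (PySem.List.pyRange 1 q 1).foldl
              (fun (st : PySem.Set (Int × Int) × List (Int × Int)) s =>
                if PySem.Set.contains st.1 (p - r, q - s) then st
                else (PySem.Set.add st.1 (r, s), st.2 ++ [(r, s)]))
              st)
          (seen, mods)).2
        = (PySem.List.pyRange r0 p 1).foldl
            (fun (mods : List (Int × Int)) r =>
              if 2 * r < p then
                (PySem.List.pyRange 1 q 1).foldl (fun mods s => mods ++ [(r, s)]) mods
              else if 2 * r = p then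
                (PySem.List.pyRange 1 (PySem.Int.floordiv q 2 + 1) 1).foldl (fun mods s => mods ++ [(r, s)]) mods
              else mods)
            mods := by
  intro n
  induction n with
  | zero =>
    intro r0 seen mods hr1 hn hseen
    rw [PySem.List.pyRange_one_eq_nil (show p ≤ r0 by omega)]
    rfl
  | succ n ih =>
    intro r0 seen mods hr1 hn hseen
    have hlt : r0 < p := by omega
    rw [PySem.List.pyRange_one_cons hlt]
    simp only [List.foldl_cons]
    obtain ⟨hA2, hA1⟩ := kac_inner p q r0 hr1 hlt (q - 1).toNat 1 seen mods
      (le_refl 1) (Or.inr rfl) rfl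
      (fun x => by rw [hseen x]; constructor
                   · intro h; exact Or.inl h
                   · rintro (h | ⟨h1, h2, h3, h4⟩)
                     · exact h
                     · omega)
    set t := (PySem.List.pyRange 1 q 1).foldl
        (fun (st : PySem.Set (Int × Int) × List (Int × Int)) s =>
          if PySem.Set.contains st.1 (p - r0, q - s) then st
          else (PySem.Set.add st.1 (r0, s), st.2 ++ [(r0, s)]))
        (seen, mods) with ht
    have hinv : ∀ x : Int × Int, x ∈ t.1 ↔
        (1 ≤ x.1 ∧ x.1 < r0 + 1 ∧ 1 ≤ x.2 ∧ x.2 < q ∧ keepB p q x.1 x.2 = true) := by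
      intro x
      rw [hA1 x]
      constructor
      · rintro (⟨a, b, c, d, e⟩ | ⟨a, b, c, d⟩)
        · exact ⟨a, by omega, c, d, e⟩
        · exact ⟨by omega, by omega, b, c, by rw [a]; exact d⟩
      · rintro ⟨a, b, c, d, e⟩
        by_cases hx : x.1 = r0
        · exact Or.inr ⟨hx, c, d, by rw [← hx]; exact e⟩
        · exact Or.inl ⟨a, by omega, c, d, e⟩
    have hstep : t.2 = (fun (mods : List (Int × Int)) r =>
        if 2 * r < p then
          (PySem.List.pyRange 1 q 1).foldl (fun mods s => mods ++ [(r, s)]) mods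
        else if 2 * r = p then
          (PySem.List.pyRange 1 (PySem.Int.floordiv q 2 + 1) 1).foldl (fun mods s => mods ++ [(r, s)]) mods
        else mods) mods r0 := by
      rcases lt_trichotomy (2*r0) p with hb | hb | hb
      · rw [hA2]
        simp only [if_pos hb]
        rw [PySem.List.foldl_append_singleton_eq_map]
        congr 1
        rw [List.filter_eq_self.mpr]
        intro s _
        simp [keepB]; omega
      · rw [hA2]
        simp only [if_neg (by omega : ¬ 2 * r0 < p), if_pos hb]
        rw [PySem.List.foldl_append_singleton_eq_map, kac_filter_mid p q r0 hb]
      · rw [hA2]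
        simp only [if_neg (by omega : ¬ 2 * r0 < p), if_neg (by omega : ¬ 2 * r0 = p)]
        have : (PySem.List.pyRange 1 q 1).filter (fun s => keepB p q r0 s) = [] := by
          rw [List.filter_eq_nil_iff]
          intro s _
          simp [keepB]; omega
        rw [this]
        simp
    calc ((PySem.List.pyRange (r0+1) p 1).foldl
            (fun (st : PySem.Set (Int × Int) × List (Int × Int)) r =>
              (PySem.List.pyRange 1 q 1).foldl
                (fun (st : PySem.Set (Int × Int) × List (Int × Int)) s =>
                  if PySem.Set.contains st.1 (p - r, q - s) then st
                  else (PySem.Set.add st.1 (r, s), st.2 ++ [(r, s)]))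
                st)
            t).2
        = ((PySem.List.pyRange (r0+1) p 1).foldl
            (fun (st : PySem.Set (Int × Int) × List (Int × Int)) r =>
              (PySem.List.pyRange 1 q 1).foldl
                (fun (st : PySem.Set (Int × Int) × List (Int × Int)) s =>
                  if PySem.Set.contains st.1 (p - r, q - s) then st
                  else (PySem.Set.add st.1 (r, s), st.2 ++ [(r, s)]))
                st)
            (t.1, t.2)).2 := by rw [Prod.mk.eta]
      _ = _ := by
            rw [ih (r0+1) t.1 t.2 (by omega) (by omega) hinv, hstep]

lemma kac_eq (p q : Int) : kac_table p q = kac_table_alt p q := by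
  unfold kac_table kac_table_alt
  exact kac_outer p q (p - 1).toNat 1 PySem.Set.empty [] (le_refl 1) rfl
    (fun x => by simp [PySem.Set.empty]; omega)

-- ===== VERDICT (by name: the statement is the Claim_ definition above) =====
theorem kac_table_spec : Claim_equal_kac_table := fun p q _ => kac_eq p q
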